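-- pv_equiv track=rewrite | github.com/codenginebd/idtp | solutions.py | solution
-- ===== SOURCE A (Python) =====
-- def solution(A, S):
--     # write your code in Python 3.6
--     if not A:
--         return 0
--
--     result = 0
--     cur_sum = 0
--     freq = {}
--     n = len(A)
--     MAX_RESULT = 1000000000
--     for i in range(0, n):
--         cur_sum += (A[i] - S)
--         if (cur_sum == 0):
--             result += 1
--         if cur_sum in freq:
--             result += freq[cur_sum]
--
--         if cur_sum in freq:
--             freq[cur_sum] += 1
--         else:
--             freq[cur_sum] = 1
--
--     return result if result <= MAX_RESULT else MAX_RESULT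
-- ===== SOURCE B (Python) =====
-- def solution(A, S):
--     if not A:
--         return 0
--     result = 0
--     for start in range(len(A)):
--         acc = 0
--         for x in A[start:]:
--             acc += x - S
--             if acc == 0:
--                 result += 1
--     MAX_RESULT = 1000000000
--     return result if result <= MAX_RESULT else MAX_RESULT
-- ===== Notes on version B (the rewrite author's own statement) =====
-- stated objective: simpler
-- what changed: Replaced the prefix-sum + frequency-dictionary counting with a direct double loop that, for every start index, accumulates (A[j]-S) over the suffix and counts the window each time the accumulator hits zero.
import Mathlib
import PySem

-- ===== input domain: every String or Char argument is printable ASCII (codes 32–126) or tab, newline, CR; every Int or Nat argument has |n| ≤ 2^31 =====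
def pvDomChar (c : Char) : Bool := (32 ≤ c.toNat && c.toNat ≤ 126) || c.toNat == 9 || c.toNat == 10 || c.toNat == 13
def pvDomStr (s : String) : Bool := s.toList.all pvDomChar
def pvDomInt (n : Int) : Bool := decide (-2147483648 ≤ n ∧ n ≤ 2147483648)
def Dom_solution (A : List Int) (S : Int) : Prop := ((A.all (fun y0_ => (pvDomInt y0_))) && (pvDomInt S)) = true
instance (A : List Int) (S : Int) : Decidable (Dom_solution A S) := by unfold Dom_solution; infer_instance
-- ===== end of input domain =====

-- B replaces A's prefix-sum + frequency-dictionary counting with a plain double loop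
-- (for each start, accumulate A[j]-S over the suffix, counting zero hits); simpler, not faster.

-- ===== PORT A =====
-- loop body of A: state (result, cur_sum, freq), element A[i]
def stepA (S : Int) (st : Int × Int × PySem.Dict Int Int) (x : Int) : Int × Int × PySem.Dict Int Int :=
  let curSum := st.2.1 + (x - S)
  let freq := st.2.2
  let result := if curSum = 0 then st.1 + 1 else st.1
  let result := if freq.contains curSum then result + freq.getD curSum 0 else result
  let freq := if freq.contains curSum then freq.modify curSum 0 (· + 1) else freq.insert curSum 1
  (result, curSum, freq)

def solution (A : List Int) (S : Int) : Int :=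
  if A = [] then 0
  else
    let n := PySem.List.len A
    let st := (PySem.List.pyRange 0 n 1).foldl
      (fun st i => stepA S st (PySem.List.pyGetD A i 0)) (0, 0, PySem.Dict.empty)
    if st.1 ≤ 1000000000 then st.1 else 1000000000

-- ===== PORT B =====
-- inner loop body of B: state (acc, result), element x of the suffix A[start:]
def stepB (S : Int) (p : Int × Int) (x : Int) : Int × Int :=
  let acc := p.1 + (x - S)
  (acc, if acc = 0 then p.2 + 1 else p.2)

def solution_alt (A : List Int) (S : Int) : Int :=
  if A = [] then 0
  else
    let n := PySem.List.len A
    let result := (PySem.List.pyRange 0 n 1).foldl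
      (fun result start =>
        ((PySem.List.slice A (some start) none).foldl (stepB S) (0, result)).2) 0
    if result ≤ 1000000000 then result else 1000000000

-- ===== PRECONDITION & SPEC =====
def Spec_solution (A : List Int) (S : Int) (out : Int) : Prop := out = solution_alt A S
instance (A : List Int) (S : Int) (out : Int) : Decidable (Spec_solution A S out) := by unfold Spec_solution; infer_instance

-- ===== CLAIM (what is proved, stated in full; the proofs are below) =====
def Claim_equal_solution : Prop := ∀ (A : List Int) (S : Int), Dom_solution A S → Spec_solution A S (solution A S)

-- ===== LEMMAS AND PROOFS =====

def psS (S s : Int) : List Int → List Int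
  | [] => []
  | x :: xs => (s + (x - S)) :: psS S (s + (x - S)) xs

def fcnt : List Int → Nat
  | [] => 0
  | x :: xs => xs.count x + fcnt xs

def SA (u ps : List Int) : Nat := (ps.map (fun y => u.count y)).sum

lemma SA_append (u ps : List Int) (c : Int) :
    SA (u ++ [c]) ps = SA u ps + ps.count c := by
  have hy : ∀ y : Int, (u ++ [c]).count y = u.count y + (if c = y then 1 else 0) := by
    intro y
    by_cases h : c = y <;> simp [List.count_append, h]
  induction ps with
  | nil => simp [SA]
  | cons p t ih =>
      unfold SA at ih ⊢
      rw [List.map_cons, List.sum_cons, List.map_cons, List.sum_cons, hy p, ih,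
        List.count_cons]
      simp only [beq_iff_eq]
      by_cases h : c = p
      · rw [if_pos h, if_pos h.symm]; omega
      · rw [if_neg h, if_neg (fun hh => h hh.symm)]; omega

lemma SA_single (ps : List Int) : SA [(0:Int)] ps = ps.count 0 := by
  induction ps with
  | nil => rfl
  | cons p t ih =>
      unfold SA at ih ⊢
      rw [List.map_cons, List.sum_cons, ih]
      by_cases h : p = 0
      · subst h; simp [List.count_cons]; omega
      · simp [List.count_cons, h]; omega

lemma dict_step (d : PySem.Dict Int Int) (c : Int) :
    (if d.contains c then d.modify c 0 (· + 1) else d.insert c 1) = d.modify c 0 (· + 1) := by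
  by_cases h : d.contains c
  · simp [h]
  · have h' : d.contains c = false := by simpa using h
    simp only [h', Bool.false_eq_true, if_false]
    simp [PySem.Dict.modify, PySem.Dict.insert, h',
      PySem.Dict.getD_of_not_contains d 0 h']

lemma res_step (seen : List Int) (r c : Int) :
    (if (PySem.Dict.counter seen).contains c
       then (if c = 0 then r + 1 else r) + (PySem.Dict.counter seen).getD c 0
       else (if c = 0 then r + 1 else r))
      = r + ((((0:Int) :: seen).count c : Nat) : Int) := by
  rw [PySem.Dict.getD_counter, PySem.Dict.contains_counter]
  by_cases hm : c ∈ seen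
  · rw [if_pos (by simpa using hm)]
    by_cases h0 : c = 0 <;> simp [h0, List.count_cons, eq_comm] <;> push_cast <;> omega
  · rw [if_neg (by simpa using hm)]
    have hz : seen.count c = 0 := List.count_eq_zero.mpr hm
    by_cases h0 : c = 0
    · subst h0; simp [List.count_cons, hz]
    · simp [List.count_cons, h0, hz]; omega

lemma invA (S : Int) (l : List Int) : ∀ (r s : Int) (seen : List Int),
    (l.foldl (stepA S) (r, s, PySem.Dict.counter seen)).1
      = r + ((SA ((0:Int) :: seen) (psS S s l) + fcnt (psS S s l) : Nat) : Int) := by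
  induction l with
  | nil => intro r s seen; simp [psS, SA, fcnt]
  | cons x xs ih =>
      intro r s seen
      rw [List.foldl_cons]
      have hstep : stepA S (r, s, PySem.Dict.counter seen) x
          = (r + ((((0:Int) :: seen).count (s + (x - S)) : Nat) : Int), s + (x - S),
             PySem.Dict.counter (seen ++ [s + (x - S)])) := by
        unfold stepA
        simp only
        rw [dict_step, res_step, ← PySem.Dict.counter_append_singleton]
      rw [hstep, ih]
      show _ = r + ((SA ((0:Int) :: seen) (psS S s (x :: xs)) + fcnt (psS S s (x :: xs)) : Nat) : Int)
      set c := s + (x - S) with hc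
      have hps : psS S s (x :: xs) = c :: psS S c xs := rfl
      rw [hps]
      have h1 : SA ((0:Int) :: seen) (c :: psS S c xs)
          = ((0:Int) :: seen).count c + SA ((0:Int) :: seen) (psS S c xs) := by
        unfold SA; rw [List.map_cons, List.sum_cons]
      have h2 : fcnt (c :: psS S c xs) = (psS S c xs).count c + fcnt (psS S c xs) := rfl
      have h3 : SA ((0:Int) :: (seen ++ [c])) (psS S c xs)
          = SA ((0:Int) :: seen) (psS S c xs) + (psS S c xs).count c := by
        have := SA_append ((0:Int) :: seen) (psS S c xs) c
        simpa using this
      rw [h1, h2, h3]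
      push_cast
      ring

lemma invB (S : Int) (xs : List Int) : ∀ (a r : Int),
    (xs.foldl (stepB S) (a, r)).2 = r + (((psS S a xs).count 0 : Nat) : Int) := by
  induction xs with
  | nil => intro a r; simp [psS]
  | cons x t ih =>
      intro a r
      rw [List.foldl_cons]
      show ((t.foldl (stepB S) (a + (x - S), if a + (x - S) = 0 then r + 1 else r)).2) = _
      rw [ih]
      have : psS S a (x :: t) = (a + (x - S)) :: psS S (a + (x - S)) t := by simp [psS]
      rw [this, List.count_cons]
      by_cases h0 : a + (x - S) = 0
      · simp [h0]; push_cast; omega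
      · simp [h0, fun hh : (0:Int) = a + (x - S) => h0 hh.symm]

lemma psS_shift (S : Int) (ys : List Int) : ∀ (a b : Int),
    psS S (a + b) ys = (psS S b ys).map (a + ·) := by
  induction ys with
  | nil => intro a b; simp [psS]
  | cons y t ih =>
      intro a b
      show (a + b + (y - S)) :: psS S (a + b + (y - S)) t
        = (a + (b + (y - S))) :: (psS S (b + (y - S)) t).map (a + ·)
      rw [show a + b + (y - S) = a + (b + (y - S)) by ring]
      rw [ih a (b + (y - S))]

lemma fcnt_map_add (a : Int) (q : List Int) : fcnt (q.map (a + ·)) = fcnt q := by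
  induction q with
  | nil => rfl
  | cons x t ih =>
      show (t.map (a + ·)).count (a + x) + fcnt (t.map (a + ·)) = t.count x + fcnt t
      rw [ih, List.count_map_of_injective t (a + ·) (fun u v h => by exact add_left_cancel h) x]

lemma B_sum_nat (S : Int) (l : List Int) :
    ((List.range l.length).map (fun k => (psS S 0 (l.drop k)).count 0)).sum
      = fcnt ((0:Int) :: psS S 0 l) := by
  induction l with
  | nil => simp [psS, fcnt]
  | cons x t ih =>
      rw [List.length_cons, List.range_succ_eq_map, List.map_cons, List.sum_cons, List.map_map]
      have h1 : ((List.range t.length).map ((fun k => (psS S 0 ((x :: t).drop k)).count 0) ∘ Nat.succ)).sum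
          = fcnt ((0:Int) :: psS S 0 t) := by
        rw [← ih]
        rfl
      rw [h1, List.drop_zero]
      -- remains: (psS S 0 (x::t)).count 0 + fcnt (0 :: psS S 0 t) = fcnt (0 :: psS S 0 (x::t))
      have hkey : fcnt (psS S 0 (x :: t)) = fcnt ((0:Int) :: psS S 0 t) := by
        have hx : psS S 0 (x :: t) = ((0:Int) :: psS S 0 t).map ((x - S) + ·) := by
          show (0 + (x - S)) :: psS S (0 + (x - S)) t = _
          rw [List.map_cons]
          have h2 : psS S (0 + (x - S)) t = (psS S 0 t).map ((x - S) + ·) := by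
            rw [show (0 : Int) + (x - S) = (x - S) + 0 by ring, psS_shift]
          rw [h2]
          norm_num
        rw [hx, fcnt_map_add]
      show (psS S 0 (x :: t)).count 0 + fcnt ((0:Int) :: psS S 0 t)
          = (psS S 0 (x :: t)).count 0 + fcnt (psS S 0 (x :: t))
      rw [hkey]

lemma B_sum (S : Int) (l : List Int) :
    (((List.range l.length).map (fun k => (((psS S 0 (l.drop k)).count 0 : Nat) : Int))).sum)
      = ((fcnt ((0:Int) :: psS S 0 l) : Nat) : Int) := by
  rw [← B_sum_nat S l, Nat.cast_list_sum, List.map_map]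
  rfl

lemma A_loop (A : List Int) (S : Int) :
    ((PySem.List.pyRange 0 (PySem.List.len A) 1).foldl
      (fun st i => stepA S st (PySem.List.pyGetD A i 0)) (0, 0, PySem.Dict.empty)).1
      = ((fcnt ((0:Int) :: psS S 0 A) : Nat) : Int) := by
  rw [PySem.List.foldl_pyRange_pyGetD A 0 (stepA S) (0, 0, PySem.Dict.empty) (le_refl 0)]
  rw [show ((0, 0, PySem.Dict.empty) : Int × Int × PySem.Dict Int Int)
      = (0, 0, PySem.Dict.counter ([] : List Int)) from rfl]
  rw [show (0:Int).toNat = 0 from rfl, List.drop_zero, invA]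
  rw [show SA ((0:Int) :: []) (psS S 0 A) = (psS S 0 A).count 0 from SA_single _]
  rw [show fcnt ((0:Int) :: psS S 0 A) = (psS S 0 A).count 0 + fcnt (psS S 0 A) from rfl]
  omega

lemma B_loop (A : List Int) (S : Int) :
    ((PySem.List.pyRange 0 (PySem.List.len A) 1).foldl
      (fun result start => ((PySem.List.slice A (some start) none).foldl (stepB S) (0, result)).2) 0)
      = ((fcnt ((0:Int) :: psS S 0 A) : Nat) : Int) := by
  rw [PySem.List.foldl_congr_mem _ _
    (fun result start => result + (((psS S 0 (A.drop start.toNat)).count 0 : Nat) : Int)) 0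
    (by intro acc x hx
        have hx0 : (0:Int) ≤ x := ((PySem.List.mem_pyRange_one).1 hx).1
        rw [PySem.List.slice_from A hx0, invB])]
  rw [PySem.List.foldl_add, PySem.List.pyRange_one, List.map_map, zero_add]
  simp only [Function.comp, zero_add, Int.toNat_natCast, PySem.List.len_eq, sub_zero]
  exact B_sum S A

-- ===== VERDICT (by name: the statement is the Claim_ definition above) =====
theorem solution_spec : Claim_equal_solution := by
  intro A S _
  unfold Spec_solution solution solution_alt
  by_cases h : A = []
  · simp [h]
  · simp only [h, if_false]
    rw [A_loop, B_loop]
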